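-- pv_equiv track=rewrite | github.com/jbevemyr/jaktpass | pyserver/jaktpass_pyserver.py | split_by_id
-- ===== SOURCE A (Python) =====
-- from typing import Any, Dict, List, Optional, Tuple
--
-- def split_by_id(items: List[Dict[str, Any]], entity_id: str) -> Tuple[Optional[Dict[str, Any]], List[Dict[str, Any]]]:
--     rest = []
--     found = None
--     for e in items:
--         if found is None and (e.get("id") or "") == entity_id:
--             found = e
--         else:
--             rest.append(e)
--     return found, rest
-- ===== SOURCE B (Python) =====
-- def split_by_id(items, entity_id):
--     idx = next((i for i, e in enumerate(items) if (e.get("id") or "") == entity_id), None)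
--     if idx is None:
--         return None, list(items)
--     return items[idx], items[:idx] + items[idx + 1:]
-- ===== Notes on version B (the rewrite author's own statement) =====
-- stated objective: simpler
-- what changed: B finds the index of the first matching element with next(...) over enumerate and builds the rest by slicing around it, instead of A's loop that carries a found flag and appends every non-taken element one by one.
import Mathlib
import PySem

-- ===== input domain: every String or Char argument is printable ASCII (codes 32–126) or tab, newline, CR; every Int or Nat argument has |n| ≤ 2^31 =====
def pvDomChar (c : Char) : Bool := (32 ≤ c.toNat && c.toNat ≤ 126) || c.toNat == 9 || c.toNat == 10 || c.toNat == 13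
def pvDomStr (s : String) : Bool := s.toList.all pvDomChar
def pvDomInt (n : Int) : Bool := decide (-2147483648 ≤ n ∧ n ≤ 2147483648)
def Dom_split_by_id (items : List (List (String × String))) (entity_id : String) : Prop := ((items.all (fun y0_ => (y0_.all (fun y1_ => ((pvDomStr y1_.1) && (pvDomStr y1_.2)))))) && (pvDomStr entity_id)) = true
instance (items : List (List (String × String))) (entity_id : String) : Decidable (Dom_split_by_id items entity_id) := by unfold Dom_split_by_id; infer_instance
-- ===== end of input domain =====

-- ===== PORT A =====
-- B finds the first matching index and slices; A carries a found flag and appends per element (one honest line: B is a simpler decomposition, same cost).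
-- (e.get("id") or "") : first-match lookup, None coalesced to ""; on string values `or ""` leaves any string (incl. "") unchanged
def pvGetId (e : List (String × String)) : String := (e.lookup "id").getD ""

def splitLoopA (entity_id : String) : List (List (String × String)) → Option (List (String × String)) → List (List (String × String)) → (Option (List (String × String))) × (List (List (String × String)))
  | [], found, rest => (found, rest)
  | e :: t, found, rest =>
      if found = none ∧ pvGetId e = entity_id then
        splitLoopA entity_id t (some e) rest
      else
        splitLoopA entity_id t found (rest ++ [e])

def split_by_id (items : List (List (String × String))) (entity_id : String) : (Option (List (String × String))) × (List (List (String × String))) :=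
  splitLoopA entity_id items none []

-- ===== PORT B =====
def split_by_id_alt (items : List (List (String × String))) (entity_id : String) : (Option (List (String × String))) × (List (List (String × String))) :=
  match items.findIdx? (fun e => pvGetId e = entity_id) with
  | none => (none, items)
  | some i => (items[i]?, items.take i ++ items.drop (i + 1))

-- ===== PRECONDITION & SPEC =====
def Spec_split_by_id (items : List (List (String × String))) (entity_id : String) (out : (Option (List (String × String))) × (List (List (String × String)))) : Prop := out = split_by_id_alt items entity_id
instance (items : List (List (String × String))) (entity_id : String) (out : (Option (List (String × String))) × (List (List (String × String)))) : Decidable (Spec_split_by_id items entity_id out) := by unfold Spec_split_by_id; infer_instance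

-- ===== CLAIM =====
def Claim_equal_split_by_id : Prop := ∀ (items : List (List (String × String))) (entity_id : String), Dom_split_by_id items entity_id → Spec_split_by_id items entity_id (split_by_id items entity_id)

-- ===== LEMMAS AND PROOFS =====
theorem splitLoopA_some (eid : String) (t : List (List (String × String))) (x : List (String × String)) (rest : List (List (String × String))) :
    splitLoopA eid t (some x) rest = (some x, rest ++ t) := by
  induction t generalizing rest with
  | nil => simp [splitLoopA]
  | cons e t ih => simp [splitLoopA, ih]

theorem splitLoopA_none (eid : String) (t : List (List (String × String))) (rest : List (List (String × String))) :
    splitLoopA eid t none rest =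
      match t.findIdx? (fun e => pvGetId e = eid) with
      | none => (none, rest ++ t)
      | some i => (t[i]?, rest ++ (t.take i ++ t.drop (i + 1))) := by
  induction t generalizing rest with
  | nil => simp [splitLoopA]
  | cons e t ih =>
    by_cases h : pvGetId e = eid
    · simp [splitLoopA, h, List.findIdx?_cons, splitLoopA_some]
    · rw [splitLoopA]
      simp only [h, and_false, if_false]
      rw [ih, List.findIdx?_cons]
      simp only [h, decide_false]
      cases hf : t.findIdx? (fun e => pvGetId e = eid) with
      | none => simp
      | some i => simp [List.take_succ_cons, List.drop_succ_cons]

-- ===== VERDICT =====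
theorem split_by_id_spec : Claim_equal_split_by_id := by
  intro items eid _
  unfold Spec_split_by_id split_by_id split_by_id_alt
  rw [splitLoopA_none]
  cases hf : items.findIdx? (fun e => pvGetId e = eid) <;> simp
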